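-- pv_equiv track=rewrite | github.com/guruguru-tak/SW-Ad-gazua | SWEA/Unrated/5656. ［모의 SW 역량테스트］ 벽돌 깨기/［모의 SW 역량테스트］ 벽돌 깨기.py | drop_ball
-- ===== SOURCE A (Python) =====
-- from collections import deque
--
-- def find_first_brick(grid, grid_x):
--     h = len(grid)
--     # 위에서부터 탐색
--     for grid_y in range(h):
--         # 벽돌이 있는 위치를 찾음
--         if grid[grid_y][grid_x] > 0:
--             return grid_y
--     # 벽돌이 없는 경우
--     return None
--
-- def drop_ball(grid, grid_x):
--     # y축 길이
--     h = len(grid)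
--     # x 축 길이
--     w = len(grid[0])
--
--     # 깊은 복사로 시뮬할 그리드 생성
--     new_copy_grid = [x[:] for x in grid]
--
--     # 공이 닿는 첫번째 벽돌 찾기
--     # 해당 열(x)에서 가장 위에 있는 벽돌 찾기
--     first_grid_y = find_first_brick(new_copy_grid, grid_x)
--     if first_grid_y is None:
--         # 벽돌이 없으면 그대로 반환
--         return new_copy_grid
--
--     # bfs 로 네트워크 처럼 퍼지듯이 벽돌 제거
--     q = deque()
--     q.append((first_grid_y, grid_x, new_copy_grid[first_grid_y][grid_x]))
--     # 첫 번째 벽돌 제거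
--     new_copy_grid[first_grid_y][grid_x] = 0
--
--     dx = [0, 1, 0, -1]
--     dy = [1, 0, -1, 0]
--
--     while q:
--         y, x, pow = q.popleft()
--
--         for i in range(4):
--             for p in range(1, pow):
--                 # 본인 블럭 포함 pow까지라 범위는 1 <= < pow
--                 ny = (dy[i]*p) + y
--                 nx = (dx[i]*p) + x
--                 if 0 <= ny < h and 0 <= nx < w and new_copy_grid[ny][nx] > 0:
--                     # 앞으로 퍼질 ny, nx 값과 다음 pow 값 큐에 넣기
--                     q.append((ny, nx, new_copy_grid[ny][nx]))
--                     # 터지면 0으로 바꿔주기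
--                     new_copy_grid[ny][nx] = 0
--
--     # 가장 아래까지 내려가야 하기에 아래 -> 위로 탐색
--     # x 축 한개 독립적 하강
--     for x in range(w):
--         # 아래쪽부터 채우기 시작
--         fill_y = h - 1
--         # 초기값은 맨 아래 행의 인덱스(h-1)
--         # 맨 아래 행부터 위로 탐색 for 문 반복
--         for y in range(h - 1, -1, -1):
--             # 현재 셀이 0보다 크면 벽돌 존재 -> 벽돌을 아래로 이동
--             # 현재 셀 0이면 벽돌 없음 fill_y h-1, y h-2 로 간다
--             if new_copy_grid[y][x] > 0:
--                 # bfs 이용해서 이미 0처리 된 후 벽돌 한개라도 발견시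
--                 # new_copy_grid[y][x] -> new_copy_grid[fill_y][x] 넣기
--                 new_copy_grid[fill_y][x] = new_copy_grid[y][x]
--
--                 # 만약 fill_y != y 다른위치여야 작동
--                 # 만약 현재 넣을 fill_y 가 y 위치 이동 후 원래 y 는 0
--                 if fill_y != y:
--                     new_copy_grid[y][x] = 0
--                 # 벽돌을 채운 후, fill_y를 1 감소하여 다음 빈 칸으로 이동
--                 fill_y -= 1
--
--     return new_copy_grid
-- ===== SOURCE B (Python) =====
-- def find_first_brick(grid, grid_x):
--     for grid_y in range(len(grid)):
--         if grid[grid_y][grid_x] > 0: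
--             return grid_y
--     return None
--
--
-- def explode(grid, y, x, power):
--     # recursive DFS: blast a cross of radius power-1 around (y, x),
--     # clearing each hit brick and chaining with the brick's own power
--     h, w = len(grid), len(grid[0])
--     for dy, dx in ((1, 0), (0, 1), (-1, 0), (0, -1)):
--         for p in range(1, power):
--             ny, nx = y + dy * p, x + dx * p
--             if 0 <= ny < h and 0 <= nx < w and grid[ny][nx] > 0:
--                 v = grid[ny][nx]
--                 grid[ny][nx] = 0
--                 explode(grid, ny, nx, v)
--
--
-- def drop_ball(grid, grid_x):
--     h, w = len(grid), len(grid[0])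
--     new_grid = [row[:] for row in grid]
--
--     first_y = find_first_brick(new_grid, grid_x)
--     if first_y is None:
--         return new_grid
--
--     power = new_grid[first_y][grid_x]
--     new_grid[first_y][grid_x] = 0
--     explode(new_grid, first_y, grid_x, power)
--
--     # gravity: per-column two-pointer fill from the bottom
--     for x in range(w):
--         fill_y = h - 1
--         for y in range(h - 1, -1, -1):
--             if new_grid[y][x] > 0:
--                 new_grid[fill_y][x] = new_grid[y][x]
--                 if fill_y != y:
--                     new_grid[y][x] = 0
--                 fill_y -= 1
--
--     return new_grid
-- ===== Notes on version B (the rewrite author's own statement) =====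
-- stated objective: simpler
-- what changed: Replaces the deque-based BFS explosion with a recursive DFS helper explode() that clears each hit brick and immediately chains with its captured power (the cleared set is traversal-order independent since each cell is cleared at most once); the copy, seeding and per-column gravity sweep are kept.
-- outside the precondition, e.g. on drop_ball([[1], [2, 3]], 0): A returns [[0], [2, 3]], B returns [[0], [2, 3]]
import Mathlib
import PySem

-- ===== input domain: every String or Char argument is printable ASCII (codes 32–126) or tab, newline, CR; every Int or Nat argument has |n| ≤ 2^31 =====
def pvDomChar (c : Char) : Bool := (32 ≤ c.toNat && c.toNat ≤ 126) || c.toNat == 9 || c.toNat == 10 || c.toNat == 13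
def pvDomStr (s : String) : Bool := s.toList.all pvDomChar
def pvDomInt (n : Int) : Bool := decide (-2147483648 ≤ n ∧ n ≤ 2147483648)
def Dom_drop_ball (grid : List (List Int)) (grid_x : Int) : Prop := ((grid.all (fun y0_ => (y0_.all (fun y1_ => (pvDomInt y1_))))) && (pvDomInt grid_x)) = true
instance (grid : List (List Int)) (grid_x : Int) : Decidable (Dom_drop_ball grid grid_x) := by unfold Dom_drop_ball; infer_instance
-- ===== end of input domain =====

-- B replaces A's deque-BFS explosion with a recursive DFS explode helper (the cleared set is the
-- same closure, each cell is cleared at most once); copy, seeding and the per-column gravity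
-- sweep are code shared by both Pythons.

-- ===== PORT A =====
-- shared low-level cell access (Python 'g[y][x]' / 'g[y][x] = v'; total via defaults, exact under Pre_)
def pvCell (g : List (List Int)) (y x : Int) : Int :=
  PySem.List.pyGetD (PySem.List.pyGetD g y ([] : List Int)) x 0

def pvSetCell (g : List (List Int)) (y x v : Int) : List (List Int) :=
  PySem.List.pySetD g y (PySem.List.pySetD (PySem.List.pyGetD g y ([] : List Int)) x v)

-- wrap lemmas for one negative column index

-- find_first_brick (identical helper in Source A and Source B): first y in range(h) with grid[y][grid_x] > 0
def findFirstBrick (g : List (List Int)) (gx : Int) : Option Int :=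
  (PySem.List.pyRange 0 (g.length : Int) 1).find? (fun y => decide (0 < pvCell g y gx))

-- the per-column two-pointer gravity sweep (identical code in Source A and Source B)
def pvGravity (h w : Int) (g0 : List (List Int)) : List (List Int) :=
  (PySem.List.pyRange 0 w 1).foldl (fun g x =>
    ((PySem.List.pyRange (h - 1) (-1) (-1)).foldl
      (fun (st : List (List Int) × Int) y =>
        if 0 < pvCell st.1 y x then
          let g1 := pvSetCell st.1 st.2 x (pvCell st.1 y x)
          let g2 := if st.2 ≠ y then pvSetCell g1 y x 0 else g1
          (g2, st.2 - 1)
        else st)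
      (g, h - 1)).1) g0

-- number of positive cells: fuel bound for the loops (a totality guard only)
def pvPos (g : List (List Int)) : Nat := (g.map (fun r => r.countP (fun v => decide (0 < v)))).sum

-- dy = [1, 0, -1, 0]; dx = [0, 1, 0, -1]
def pvDy (i : Int) : Int := PySem.List.pyGetD [1, 0, -1, 0] i 0

def pvDx (i : Int) : Int := PySem.List.pyGetD [0, 1, 0, -1] i 0

-- one BFS dequeue step: 'for i in range(4): for p in range(1, pow): …' threading (grid, queue)
def pvScanA (h w : Int) (st : List (List Int) × List (Int × Int × Int)) (y x pw : Int) :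
    List (List Int) × List (Int × Int × Int) :=
  (PySem.List.pyRange 0 4 1).foldl (fun st i =>
    (PySem.List.pyRange 1 pw 1).foldl (fun st p =>
      let ny := pvDy i * p + y
      let nx := pvDx i * p + x
      if 0 ≤ ny ∧ ny < h ∧ 0 ≤ nx ∧ nx < w ∧ 0 < pvCell st.1 ny nx then
        (pvSetCell st.1 ny nx 0, st.2 ++ [(ny, nx, pvCell st.1 ny nx)])
      else st) st) st

-- 'while q: y, x, pow = q.popleft(); …' (fuel is a totality guard; sufficient under Pre_)
def pvBfs (h w : Int) : Nat → List (List Int) → List (Int × Int × Int) → List (List Int)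
  | 0, g, _ => g
  | _ + 1, g, [] => g
  | f + 1, g, (y, x, pw) :: rest =>
      let st := pvScanA h w (g, rest) y x pw
      pvBfs h w f st.1 st.2

def drop_ball (grid : List (List Int)) (grid_x : Int) : List (List Int) :=
  let h : Int := (grid.length : Int)
  let w : Int := ((PySem.List.pyGetD grid 0 ([] : List Int)).length : Int)
  match findFirstBrick grid grid_x with
  | none => grid
  | some fy =>
      let v := pvCell grid fy grid_x
      let g1 := pvSetCell grid fy grid_x 0
      pvGravity h w (pvBfs h w (2 * pvPos g1 + 2) g1 [(fy, grid_x, v)])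

-- ===== PORT B =====
-- recursive DFS: 'for dy, dx in ((1,0),(0,1),(-1,0),(0,-1)): for p in range(1, power): …'
def pvExplode (h w : Int) : Nat → List (List Int) → Int → Int → Int → List (List Int)
  | 0, g, _, _, _ => g
  | f + 1, g, y, x, pw =>
      ([((1 : Int), (0 : Int)), (0, 1), (-1, 0), (0, -1)]).foldl (fun g d =>
        (PySem.List.pyRange 1 pw 1).foldl (fun g p =>
          let ny := y + d.1 * p
          let nx := x + d.2 * p
          if 0 ≤ ny ∧ ny < h ∧ 0 ≤ nx ∧ nx < w ∧ 0 < pvCell g ny nx then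
            pvExplode h w f (pvSetCell g ny nx 0) ny nx (pvCell g ny nx)
          else g) g) g

def drop_ball_alt (grid : List (List Int)) (grid_x : Int) : List (List Int) :=
  let h : Int := (grid.length : Int)
  let w : Int := ((PySem.List.pyGetD grid 0 ([] : List Int)).length : Int)
  match findFirstBrick grid grid_x with
  | none => grid
  | some fy =>
      let power := pvCell grid fy grid_x
      let g1 := pvSetCell grid fy grid_x 0
      pvGravity h w (pvExplode h w (pvPos g1 + 1) g1 fy grid_x power)

-- ===== PRECONDITION & SPEC =====
-- Pre_ = the inputs on which A returns: a non-empty rectangular grid and -w ≤ grid_x < w.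
-- Elsewhere A's per-row indexing raises IndexError (always on an empty grid, a column-truncated
-- row or an out-of-range grid_x; on ragged grids whose extra rows are longer than the first,
-- whether A raises depends on the brick layout, so those are excluded too).
def Pre_drop_ball (grid : List (List Int)) (grid_x : Int) : Prop :=
  grid ≠ [] ∧ (∀ row ∈ grid, row.length = (grid.headD []).length) ∧
    (-((grid.headD []).length : Int) ≤ grid_x ∧ grid_x < ((grid.headD []).length : Int))
instance (grid : List (List Int)) (grid_x : Int) : Decidable (Pre_drop_ball grid grid_x) := by
  unfold Pre_drop_ball; infer_instance

def pvWitness_drop_ball : List (List Int) × Int := ([[1, 0], [2, 2]], 0)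

def Spec_drop_ball (grid : List (List Int)) (grid_x : Int) (out : List (List Int)) : Prop := out = drop_ball_alt grid grid_x
instance (grid : List (List Int)) (grid_x : Int) (out : List (List Int)) : Decidable (Spec_drop_ball grid grid_x out) := by unfold Spec_drop_ball; infer_instance

-- ===== CLAIM (what is proved, stated in full; the proofs are below) =====
def Claim_equal_drop_ball : Prop := ∀ (grid : List (List Int)) (grid_x : Int), Dom_drop_ball grid grid_x → Pre_drop_ball grid grid_x → Spec_drop_ball grid grid_x (drop_ball grid grid_x)

-- ===== LEMMAS AND PROOFS =====

theorem pvSetD_wrap (r : List Int) (x v : Int) (h1 : -(r.length : Int) ≤ x) (h2 : x < 0) :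
    PySem.List.pySetD r x v = PySem.List.pySetD r (x + r.length) v := by
  unfold PySem.List.pySetD PySem.List.pySet? PySem.List.pyIdx?
  have hx : ¬ 0 ≤ x := by omega
  have h3 : 0 ≤ x + (r.length : Int) := by omega
  have h4 : x + (r.length : Int) < (r.length : Int) := by omega
  simp only [hx, h1, h3, h4, if_pos, if_neg, not_false_iff]
  have : r.length - (-x).toNat = (x + (r.length : Int)).toNat := by omega
  simp [this]

theorem pvSetCell_wrap (g : List (List Int)) (y x v : Int)
    (hx1 : -((PySem.List.pyGetD g y ([] : List Int)).length : Int) ≤ x) (hx2 : x < 0) :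
    pvSetCell g y x v = pvSetCell g y (x + (PySem.List.pyGetD g y ([] : List Int)).length) v := by
  unfold pvSetCell; rw [pvSetD_wrap _ _ _ hx1 hx2]

theorem pvRow_eq (g : List (List Int)) (y : Int) (hy0 : 0 ≤ y) (hy1 : y < (g.length : Int)) :
    PySem.List.pyGetD g y ([] : List Int) = g[y.toNat]'(by omega) := by
  rw [PySem.List.pyGetD_eq_getElem _ _ hy0 hy1]

theorem pvCell_eq (g : List (List Int)) (y x : Int) (hy0 : 0 ≤ y) (hy1 : y < (g.length : Int))
    (hx0 : 0 ≤ x) (hx1 : x < ((g.getD y.toNat []).length : Int)) :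
    pvCell g y x = (g.getD y.toNat []).getD x.toNat 0 := by
  have hyl : y.toNat < g.length := by omega
  have hrow : PySem.List.pyGetD g y ([] : List Int) = g.getD y.toNat [] := by
    rw [pvRow_eq g y hy0 hy1]
    simp [List.getD_eq_getElem?_getD, List.getElem?_eq_getElem hyl]
  unfold pvCell
  rw [hrow, PySem.List.pyGetD_eq_getElem _ _ hx0 (by exact_mod_cast hx1)]
  have hb : x.toNat < (g.getD y.toNat []).length := by omega
  exact (List.getD_eq_getElem _ _ hb).symm

theorem pvSetCell_eq (g : List (List Int)) (y x v : Int) (hy0 : 0 ≤ y) (hy1 : y < (g.length : Int))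
    (hx0 : 0 ≤ x) :
    pvSetCell g y x v = g.set y.toNat ((g.getD y.toNat []).set x.toNat v) := by
  have hyl : y.toNat < g.length := by omega
  have hrow : PySem.List.pyGetD g y ([] : List Int) = g.getD y.toNat [] := by
    rw [pvRow_eq g y hy0 hy1]
    simp [List.getD_eq_getElem?_getD, List.getElem?_eq_getElem hyl]
  unfold pvSetCell
  rw [hrow, PySem.List.pySetD_of_nonneg _ _ hy0, PySem.List.pySetD_of_nonneg _ _ hx0]

theorem pvCell_pvSetCell (g : List (List Int)) (w : Nat) (hrect : ∀ r ∈ g, r.length = w)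
    (y x y' x' v : Int)
    (hy : 0 ≤ y ∧ y < (g.length : Int)) (hx : 0 ≤ x ∧ x < (w : Int))
    (hy' : 0 ≤ y' ∧ y' < (g.length : Int)) (hx' : 0 ≤ x' ∧ x' < (w : Int)) :
    pvCell (pvSetCell g y x v) y' x' = if y' = y ∧ x' = x then v else pvCell g y' x' := by
  have hyl : y.toNat < g.length := by omega
  have hyl' : y'.toNat < g.length := by omega
  have hrowy : (g.getD y.toNat []).length = w := by
    rw [List.getD_eq_getElem?_getD, List.getElem?_eq_getElem hyl]
    exact hrect _ (List.getElem_mem _)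
  have hrowy' : (g.getD y'.toNat []).length = w := by
    rw [List.getD_eq_getElem?_getD, List.getElem?_eq_getElem hyl']
    exact hrect _ (List.getElem_mem _)
  have hxlt : x.toNat < (g.getD y.toNat []).length := by omega
  rw [pvSetCell_eq g y x v hy.1 hy.2 hx.1]
  set row' := (g.getD y.toNat []).set x.toNat v with hrowdef
  have hsetlen : (g.set y.toNat row').length = g.length := by simp
  have hget : (g.set y.toNat row').getD y'.toNat [] =
      if y.toNat = y'.toNat then row' else g.getD y'.toNat [] := by
    rw [List.getD_eq_getElem?_getD, List.getElem?_set]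
    by_cases hyy : y.toNat = y'.toNat
    · simp [hyy, hyl']
    · simp [hyy, List.getD_eq_getElem?_getD]
  have hrlen : ((g.set y.toNat row').getD y'.toNat []).length = w := by
    rw [hget]; split
    · rw [hrowdef, List.length_set]; exact hrowy
    · exact hrowy'
  rw [pvCell_eq _ y' x' hy'.1 (by rw [hsetlen]; exact hy'.2) hx'.1 (by rw [hrlen]; exact hx'.2)]
  rw [pvCell_eq g y' x' hy'.1 hy'.2 hx'.1 (by rw [hrowy']; exact hx'.2)]
  rw [hget]
  by_cases hyy : y.toNat = y'.toNat
  · have hyy' : y' = y := by omega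
    rw [if_pos hyy, hrowdef]
    rw [List.getD_eq_getElem?_getD, List.getElem?_set]
    by_cases hxx : x.toNat = x'.toNat
    · have hxe : x' = x := by omega
      rw [if_pos hxx, if_pos hxlt]
      simp [hyy', hxe]
    · rw [if_neg hxx, ← List.getD_eq_getElem?_getD]
      have hne : ¬ (y' = y ∧ x' = x) := by
        rintro ⟨_, h2⟩; omega
      rw [if_neg hne, hyy]
  · have hne : ¬ (y' = y ∧ x' = x) := by
      rintro ⟨h1, _⟩; omega
    rw [if_neg hyy, if_neg hne]

theorem pvIdx_some_lt (n : Nat) (i : Int) (k : Nat) (h : PySem.List.pyIdx? n i = some k) :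
    k < n := by
  unfold PySem.List.pyIdx? at h
  split at h <;> split at h <;> simp_all <;> omega

theorem pvSetD_idx_none {α : Type} (xs : List α) (i : Int) (v : α)
    (h : PySem.List.pyIdx? xs.length i = none) : PySem.List.pySetD xs i v = xs := by
  unfold PySem.List.pySetD PySem.List.pySet?
  rw [h]; rfl

theorem pvSetD_idx_some {α : Type} (xs : List α) (i : Int) (v : α) (k : Nat)
    (h : PySem.List.pyIdx? xs.length i = some k) : PySem.List.pySetD xs i v = xs.set k v := by
  unfold PySem.List.pySetD PySem.List.pySet?
  rw [h]; rfl

theorem pvGetD_idx_some {α : Type} (xs : List α) (i : Int) (d : α) (k : Nat)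
    (h : PySem.List.pyIdx? xs.length i = some k) :
    PySem.List.pyGetD xs i d = xs[k]'(pvIdx_some_lt _ _ _ h) := by
  unfold PySem.List.pyGetD PySem.List.pyGet?
  rw [h]
  simp [List.getElem?_eq_getElem (pvIdx_some_lt _ _ _ h)]

theorem pvSetCell_length (g : List (List Int)) (y x v : Int) :
    (pvSetCell g y x v).length = g.length := PySem.List.length_pySetD _ _ _

theorem pvSetCell_rect (g : List (List Int)) (w : Nat) (hrect : ∀ r ∈ g, r.length = w)
    (y x v : Int) : ∀ r ∈ pvSetCell g y x v, r.length = w := by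
  intro r hr
  unfold pvSetCell at hr
  cases hidx : PySem.List.pyIdx? g.length y with
  | none => rw [pvSetD_idx_none _ _ _ hidx] at hr; exact hrect r hr
  | some k =>
    rw [pvSetD_idx_some _ _ _ _ hidx] at hr
    rcases List.mem_or_eq_of_mem_set hr with h | h
    · exact hrect r h
    · subst h
      rw [PySem.List.length_pySetD, pvGetD_idx_some _ _ _ _ hidx]
      exact hrect _ (List.getElem_mem _)

theorem pvCountP_set_pos (r : List Int) (j : Nat) (hj : j < r.length) (hpos : 0 < r[j]) :
    (r.set j 0).countP (fun v => decide (0 < v)) + 1 = r.countP (fun v => decide (0 < v)) := by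
  induction r generalizing j with
  | nil => simp at hj
  | cons b t ih =>
    cases j with
    | zero =>
      simp at hpos
      simp [List.set, hpos]
    | succ m =>
      simp at hj
      have hp : 0 < t[m] := by simpa using hpos
      have := ih m (by omega) hp
      simp [List.set, List.countP_cons]
      omega

theorem pvSum_set_nat (l : List Nat) (n : Nat) (a : Nat) (h : n < l.length) :
    (l.set n a).sum + l[n] = l.sum + a := by
  induction l generalizing n with
  | nil => simp at h
  | cons b t ih =>
    cases n with
    | zero => simp [List.set]; omega
    | succ m =>
      simp at h
      have := ih m (by omega)
      simp [List.set]
      omega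

theorem pvPos_setCell (g : List (List Int)) (w : Nat) (hrect : ∀ r ∈ g, r.length = w)
    (y x : Int) (hy : 0 ≤ y ∧ y < (g.length : Int)) (hx : 0 ≤ x ∧ x < (w : Int))
    (hpos : 0 < pvCell g y x) :
    pvPos (pvSetCell g y x 0) + 1 = pvPos g := by
  have hyl : y.toNat < g.length := by omega
  have hrowy : (g.getD y.toNat []).length = w := by
    rw [List.getD_eq_getElem?_getD, List.getElem?_eq_getElem hyl]
    exact hrect _ (List.getElem_mem _)
  have hxl : x.toNat < (g.getD y.toNat []).length := by omega
  have hcell : pvCell g y x = (g.getD y.toNat []).getD x.toNat 0 :=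
    pvCell_eq g y x hy.1 hy.2 hx.1 (by omega)
  rw [pvSetCell_eq g y x 0 hy.1 hy.2 hx.1]
  unfold pvPos
  rw [List.map_set]
  have hmlen : y.toNat < (g.map (fun r => r.countP (fun v => decide (0 < v)))).length := by
    simpa using hyl
  have hsum := pvSum_set_nat (g.map (fun r => r.countP (fun v => decide (0 < v)))) y.toNat
      (((g.getD y.toNat []).set x.toNat 0).countP (fun v => decide (0 < v))) hmlen
  have hgetmap : (g.map (fun r => r.countP (fun v => decide (0 < v))))[y.toNat]'(hmlen)
      = (g[y.toNat]'hyl).countP (fun v => decide (0 < v)) := by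
    simp
  have hrowelem : g.getD y.toNat [] = g[y.toNat]'hyl := by
    rw [List.getD_eq_getElem?_getD, List.getElem?_eq_getElem hyl]; rfl
  have hcnt : ((g.getD y.toNat []).set x.toNat 0).countP (fun v => decide (0 < v)) + 1
      = (g.getD y.toNat []).countP (fun v => decide (0 < v)) := by
    apply pvCountP_set_pos _ _ hxl
    rw [← List.getD_eq_getElem _ 0 hxl, ← hcell]
    exact hpos
  rw [hgetmap] at hsum
  rw [← hrowelem] at hsum
  omega

def pvZero (S : List (Int × Int)) (g0 : List (List Int)) : List (List Int) :=
  S.foldr (fun c g => pvSetCell g c.1 c.2 0) g0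

def pvPhys (g0 : List (List Int)) (w : Nat) (c : Int × Int) : Prop :=
  0 ≤ c.1 ∧ c.1 < (g0.length : Int) ∧ 0 ≤ c.2 ∧ c.2 < (w : Int)

theorem pvZero_cons (c : Int × Int) (S : List (Int × Int)) (g0 : List (List Int)) :
    pvZero (c :: S) g0 = pvSetCell (pvZero S g0) c.1 c.2 0 := rfl

theorem pvZero_length (S : List (Int × Int)) (g0 : List (List Int)) :
    (pvZero S g0).length = g0.length := by
  induction S with
  | nil => rfl
  | cons c S ih => rw [pvZero_cons, pvSetCell_length, ih]

theorem pvZero_rect (S : List (Int × Int)) (g0 : List (List Int)) (w : Nat)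
    (hrect : ∀ r ∈ g0, r.length = w) : ∀ r ∈ pvZero S g0, r.length = w := by
  induction S with
  | nil => exact hrect
  | cons c S ih => rw [pvZero_cons]; exact pvSetCell_rect _ _ ih _ _ _

theorem pvCell_pvZero (S : List (Int × Int)) (g0 : List (List Int)) (w : Nat)
    (hrect : ∀ r ∈ g0, r.length = w) (hS : ∀ c ∈ S, pvPhys g0 w c)
    (y x : Int) (hyx : pvPhys g0 w (y, x)) :
    pvCell (pvZero S g0) y x = if (y, x) ∈ S then 0 else pvCell g0 y x := by
  induction S with
  | nil => simp [pvZero]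
  | cons c S ih =>
    have hc := hS c (by simp)
    rw [pvZero_cons]
    rw [pvCell_pvSetCell (pvZero S g0) w (pvZero_rect S g0 w hrect) c.1 c.2 y x 0
      (by rw [pvZero_length]; exact ⟨hc.1, hc.2.1⟩) ⟨hc.2.2.1, hc.2.2.2⟩
      (by rw [pvZero_length]; exact ⟨hyx.1, hyx.2.1⟩) ⟨hyx.2.2.1, hyx.2.2.2⟩]
    obtain ⟨cy, cx⟩ := c
    by_cases hec : (y, x) = (cy, cx)
    · have h1 : y = cy := congrArg Prod.fst hec
      have h2 : x = cx := congrArg Prod.snd hec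
      simp [h1, h2]
    · have hne : ¬ (y = cy ∧ x = cx) := by
        intro ⟨h1, h2⟩
        exact hec (by rw [h1, h2])
      rw [if_neg hne, ih (fun d hd => hS d (by simp [hd]))]
      simp [List.mem_cons, hec]

theorem pvCell_nat (g : List (List Int)) (i j : Nat) (hi : i < g.length)
    (hj : j < (g[i]'hi).length) :
    pvCell g (i : Int) (j : Int) = (g[i]'hi)[j]'hj := by
  have h1 : ((i : Int)).toNat = i := by omega
  have hrow : g.getD i [] = g[i]'hi := by
    rw [List.getD_eq_getElem?_getD, List.getElem?_eq_getElem hi]; rfl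
  have := pvCell_eq g (i : Int) (j : Int) (by omega) (by exact_mod_cast hi) (by omega)
      (by rw [h1, hrow]; exact_mod_cast hj)
  rw [this, h1, hrow]
  simp [List.getElem?_eq_getElem hj]

theorem pvGrid_ext (g g' : List (List Int)) (hlen : g.length = g'.length)
    (hrows : ∀ i (h1 : i < g.length) (h2 : i < g'.length), (g[i]'h1).length = (g'[i]'h2).length)
    (hcells : ∀ i j (h1 : i < g.length) (h2 : i < g'.length) (h3 : j < (g[i]'h1).length)
      (h4 : j < (g'[i]'h2).length), (g[i]'h1)[j]'h3 = (g'[i]'h2)[j]'h4) : g = g' := by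
  apply List.ext_getElem hlen
  intro i h1 h2
  apply List.ext_getElem (hrows i h1 h2)
  intro j h3 h4
  exact hcells i j h1 h2 h3 h4

theorem pvZero_congr (S S' : List (Int × Int)) (g0 : List (List Int)) (w : Nat)
    (hrect : ∀ r ∈ g0, r.length = w) (hS : ∀ c ∈ S, pvPhys g0 w c)
    (hS' : ∀ c ∈ S', pvPhys g0 w c) (hmem : ∀ c, c ∈ S ↔ c ∈ S') :
    pvZero S g0 = pvZero S' g0 := by
  apply pvGrid_ext
  · rw [pvZero_length, pvZero_length]
  · intro i h1 h2
    rw [pvZero_rect S g0 w hrect _ (List.getElem_mem _),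
        pvZero_rect S' g0 w hrect _ (List.getElem_mem _)]
  · intro i j h1 h2 h3 h4
    have hi : i < g0.length := by rw [← pvZero_length S g0]; exact h1
    have hjw : j < w := by
      rw [pvZero_rect S g0 w hrect _ (List.getElem_mem _)] at h3; exact h3
    have hphys : pvPhys g0 w ((i : Int), (j : Int)) := by
      refine ⟨by omega, ?_, by omega, ?_⟩
      · show (i : Int) < (g0.length : Int); exact_mod_cast hi
      · show (j : Int) < (w : Int); exact_mod_cast hjw
    rw [← pvCell_nat (pvZero S g0) i j h1 h3, ← pvCell_nat (pvZero S' g0) i j h2 h4,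
        pvCell_pvZero S g0 w hrect hS _ _ hphys, pvCell_pvZero S' g0 w hrect hS' _ _ hphys]
    by_cases hm : ((i : Int), (j : Int)) ∈ S
    · rw [if_pos hm, if_pos ((hmem _).1 hm)]
    · rw [if_neg hm, if_neg (fun hc => hm ((hmem _).2 hc))]

def pvGoodS (g0 : List (List Int)) (w : Nat) (S : List (Int × Int)) : Prop :=
  ∀ c ∈ S, pvPhys g0 w c

def pvE (g0 : List (List Int)) (w : Nat) (ns : Int × Int) (c d : Int × Int) : Prop :=
  ∃ i p : Int, (0 ≤ i ∧ i < 4) ∧ (1 ≤ p ∧ p < pvCell g0 c.1 c.2) ∧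
    d.1 = pvDy i * p + c.1 ∧ d.2 = pvDx i * p + c.2 ∧ pvPhys g0 w d ∧
    0 < pvCell g0 d.1 d.2 ∧ d ≠ ns

inductive pvReach (g0 : List (List Int)) (w : Nat) (ns s : Int × Int) : Int × Int → Prop
  | base : pvReach g0 w ns s s
  | step : ∀ {c d : Int × Int}, pvReach g0 w ns s c → pvE g0 w ns c d → pvReach g0 w ns s d

theorem pvRange04 : PySem.List.pyRange 0 4 1 = [0, 1, 2, 3] := by decide

theorem pvScanA_inner (g0 : List (List Int)) (wn : Nat) (hrect : ∀ r ∈ g0, r.length = wn)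
    (h w : Int) (hh : h = (g0.length : Int)) (hw : w = (wn : Int))
    (ns : Int × Int) (i y x pw : Int) (hi : 0 ≤ i ∧ i < 4) (hpw : pw = pvCell g0 y x) :
    ∀ (n : Nat) (a : Int), 1 ≤ a → (pw - a).toNat = n →
    ∀ (S : List (Int × Int)) (acc : List (Int × Int × Int)),
      pvGoodS g0 wn S → ns ∈ S →
    ∃ S' jnew,
      (PySem.List.pyRange a pw 1).foldl (fun st p =>
        let ny := pvDy i * p + y
        let nx := pvDx i * p + x
        if 0 ≤ ny ∧ ny < h ∧ 0 ≤ nx ∧ nx < w ∧ 0 < pvCell st.1 ny nx then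
          (pvSetCell st.1 ny nx 0, st.2 ++ [(ny, nx, pvCell st.1 ny nx)])
        else st) (pvZero S g0, acc) = (pvZero S' g0, acc ++ jnew) ∧
      (∀ c ∈ S, c ∈ S') ∧
      (∀ c ∈ S', c ∈ S ∨ pvE g0 wn ns (y, x) c) ∧
      (∀ j ∈ jnew, (j.1, j.2.1) ∈ S' ∧ j.2.2 = pvCell g0 j.1 j.2.1 ∧
        pvE g0 wn ns (y, x) (j.1, j.2.1)) ∧
      (∀ p : Int, a ≤ p → p < pw → ∀ d : Int × Int, d.1 = pvDy i * p + y →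
        d.2 = pvDx i * p + x → pvPhys g0 wn d → 0 < pvCell g0 d.1 d.2 → d ≠ ns → d ∈ S') ∧
      (∀ c ∈ S', c ∉ S → ∃ j ∈ jnew, (j.1, j.2.1) = c) ∧
      pvGoodS g0 wn S' ∧ ns ∈ S' ∧
      2 * pvPos (pvZero S' g0) + jnew.length ≤ 2 * pvPos (pvZero S g0) := by
  intro n
  induction n with
  | zero =>
    intro a ha h0 S acc hS hns
    have hle : pw ≤ a := by omega
    refine ⟨S, [], ?_, ?_, ?_, ?_, ?_, ?_, hS, hns, ?_⟩
    · rw [PySem.List.pyRange_one_eq_nil hle]; simp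
    · exact fun c hc => hc
    · exact fun c hc => Or.inl hc
    · simp
    · intro p hp1 hp2; omega
    · exact fun c hc hnc => absurd hc hnc
    · simp
  | succ m ih =>
    intro a ha h0 S acc hS hns
    have hlt : a < pw := by omega
    rw [PySem.List.pyRange_one_cons hlt, List.foldl_cons]
    set ny := pvDy i * a + y with hny
    set nx := pvDx i * a + x with hnx
    by_cases hcond : 0 ≤ ny ∧ ny < h ∧ 0 ≤ nx ∧ nx < w ∧ 0 < pvCell (pvZero S g0) ny nx
    · -- the brick at (ny, nx) is hit and cleared
      have hphys : pvPhys g0 wn (ny, nx) := by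
        refine ⟨hcond.1, ?_, hcond.2.2.1, ?_⟩
        · have := hcond.2.1; rw [hh] at this; exact this
        · have := hcond.2.2.2.1; rw [hw] at this; exact this
      have hcur : pvCell (pvZero S g0) ny nx = if (ny, nx) ∈ S then 0 else pvCell g0 ny nx :=
        pvCell_pvZero S g0 wn hrect hS ny nx hphys
      have hnotmem : (ny, nx) ∉ S := by
        intro hmem
        have := hcond.2.2.2.2
        rw [hcur, if_pos hmem] at this
        omega
      have hval : pvCell (pvZero S g0) ny nx = pvCell g0 ny nx := by
        rw [hcur, if_neg hnotmem]
      have hpos : 0 < pvCell g0 ny nx := by rw [← hval]; exact hcond.2.2.2.2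
      have hne : (ny, nx) ≠ ns := fun hcon => hnotmem (hcon ▸ hns)
      have hE : pvE g0 wn ns (y, x) (ny, nx) := by
        refine ⟨i, a, hi, ⟨ha, by rw [← hpw]; exact hlt⟩, rfl, rfl, hphys, hpos, hne⟩
      simp only [if_pos hcond]
      have hset : pvSetCell (pvZero S g0) ny nx 0 = pvZero ((ny, nx) :: S) g0 := by
        rw [pvZero_cons]
      rw [hset]
      have hS1 : pvGoodS g0 wn ((ny, nx) :: S) := by
        intro c hc
        rcases List.mem_cons.1 hc with h | h
        · subst h; exact hphys
        · exact hS c h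
      obtain ⟨S', jnew', heq, hsub, hsound, hjobs, hcompl, hnewjob, hgood, hns', hfuel⟩ :=
        ih (a + 1) (by omega) (by omega) ((ny, nx) :: S) (acc ++ [(ny, nx, pvCell (pvZero S g0) ny nx)])
          hS1 (List.mem_cons_of_mem _ hns)
      refine ⟨S', (ny, nx, pvCell (pvZero S g0) ny nx) :: jnew', ?_, ?_, ?_, ?_, ?_, ?_, hgood, hns', ?_⟩
      · rw [heq]; simp
      · exact fun c hc => hsub c (List.mem_cons_of_mem _ hc)
      · intro c hc
        rcases hsound c hc with h | h
        · rcases List.mem_cons.1 h with h2 | h2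
          · subst h2; exact Or.inr hE
          · exact Or.inl h2
        · exact Or.inr h
      · intro j hj
        rcases List.mem_cons.1 hj with h | h
        · subst h
          exact ⟨hsub _ (List.mem_cons_self), by simpa using hval, hE⟩
        · exact hjobs j h
      · intro p hp1 hp2 d hd1 hd2 hdphys hdpos hdne
        by_cases hpa : p = a
        · subst hpa
          have : d = (ny, nx) := by
            rcases d with ⟨d1, d2⟩
            simp at hd1 hd2
            rw [hny, hnx]
            exact Prod.ext (by simpa using hd1) (by simpa using hd2)
          rw [this]
          exact hsub _ (List.mem_cons_self)
        · exact hcompl p (by omega) hp2 d hd1 hd2 hdphys hdpos hdne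
      · intro c hc hnc
        by_cases hceq : c = (ny, nx)
        · exact ⟨(ny, nx, pvCell (pvZero S g0) ny nx), List.mem_cons_self, hceq.symm⟩
        · obtain ⟨j, hj, hjc⟩ := hnewjob c hc (by
            intro hmem
            rcases List.mem_cons.1 hmem with hh1 | hh1
            · exact hceq hh1
            · exact hnc hh1)
          exact ⟨j, List.mem_cons_of_mem _ hj, hjc⟩
      · have hdec : pvPos (pvZero ((ny, nx) :: S) g0) + 1 = pvPos (pvZero S g0) := by
          rw [pvZero_cons]
          refine pvPos_setCell (pvZero S g0) wn (pvZero_rect S g0 wn hrect) ny nx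
            ⟨hphys.1, by rw [pvZero_length]; exact hphys.2.1⟩ ⟨hphys.2.2.1, hphys.2.2.2⟩
            hcond.2.2.2.2
        simp only [List.length_cons]
        omega
    · -- no brick hit at distance a in this direction
      simp only [if_neg hcond]
      obtain ⟨S', jnew, heq, hsub, hsound, hjobs, hcompl, hnewjob, hgood, hns', hfuel⟩ :=
        ih (a + 1) (by omega) (by omega) S acc hS hns
      refine ⟨S', jnew, heq, hsub, hsound, hjobs, ?_, hnewjob, hgood, hns', hfuel⟩
      intro p hp1 hp2 d hd1 hd2 hdphys hdpos hdne
      by_cases hpa : p = a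
      · subst hpa
        have hdeq : d = (ny, nx) := by
          rcases d with ⟨d1, d2⟩
          exact Prod.ext (by simpa using hd1) (by simpa using hd2)
        subst hdeq
        by_cases hmem : (ny, nx) ∈ S
        · exact hsub _ hmem
        · exfalso
          apply hcond
          refine ⟨hdphys.1, by rw [hh]; exact hdphys.2.1, hdphys.2.2.1, by rw [hw]; exact hdphys.2.2.2, ?_⟩
          rw [pvCell_pvZero S g0 wn hrect hS ny nx hdphys, if_neg hmem]
          exact hdpos
      · exact hcompl p (by omega) hp2 d hd1 hd2 hdphys hdpos hdne

theorem pvScanA_spec (g0 : List (List Int)) (wn : Nat) (hrect : ∀ r ∈ g0, r.length = wn)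
    (h w : Int) (hh : h = (g0.length : Int)) (hw : w = (wn : Nat))
    (ns : Int × Int) (y x pw : Int) (hpw : pw = pvCell g0 y x)
    (S : List (Int × Int)) (acc : List (Int × Int × Int))
    (hS : pvGoodS g0 wn S) (hns : ns ∈ S) :
    ∃ S' jnew,
      pvScanA h w (pvZero S g0, acc) y x pw = (pvZero S' g0, acc ++ jnew) ∧
      (∀ c ∈ S, c ∈ S') ∧
      (∀ c ∈ S', c ∈ S ∨ pvE g0 wn ns (y, x) c) ∧
      (∀ j ∈ jnew, (j.1, j.2.1) ∈ S' ∧ j.2.2 = pvCell g0 j.1 j.2.1 ∧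
        pvE g0 wn ns (y, x) (j.1, j.2.1)) ∧
      (∀ d : Int × Int, pvE g0 wn ns (y, x) d → d ∈ S') ∧
      (∀ c ∈ S', c ∉ S → ∃ j ∈ jnew, (j.1, j.2.1) = c) ∧
      pvGoodS g0 wn S' ∧ ns ∈ S' ∧
      2 * pvPos (pvZero S' g0) + jnew.length ≤ 2 * pvPos (pvZero S g0) := by
  unfold pvScanA
  rw [pvRange04]
  simp only [List.foldl_cons, List.foldl_nil]
  obtain ⟨S0, j0, he0, hsub0, hsnd0, hjob0, hcmp0, hnew0, hgood0, hns0, hfl0⟩ :=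
    pvScanA_inner g0 wn hrect h w hh hw ns 0 y x pw ⟨by omega, by omega⟩ hpw
      (pw - 1).toNat 1 (by omega) rfl S acc hS hns
  rw [he0]
  obtain ⟨S1, j1, he1, hsub1, hsnd1, hjob1, hcmp1, hnew1, hgood1, hns1, hfl1⟩ :=
    pvScanA_inner g0 wn hrect h w hh hw ns 1 y x pw ⟨by omega, by omega⟩ hpw
      (pw - 1).toNat 1 (by omega) rfl S0 (acc ++ j0) hgood0 hns0
  rw [he1]
  obtain ⟨S2, j2, he2, hsub2, hsnd2, hjob2, hcmp2, hnew2, hgood2, hns2, hfl2⟩ :=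
    pvScanA_inner g0 wn hrect h w hh hw ns 2 y x pw ⟨by omega, by omega⟩ hpw
      (pw - 1).toNat 1 (by omega) rfl S1 (acc ++ j0 ++ j1) hgood1 hns1
  rw [he2]
  obtain ⟨S3, j3, he3, hsub3, hsnd3, hjob3, hcmp3, hnew3, hgood3, hns3, hfl3⟩ :=
    pvScanA_inner g0 wn hrect h w hh hw ns 3 y x pw ⟨by omega, by omega⟩ hpw
      (pw - 1).toNat 1 (by omega) rfl S2 (acc ++ j0 ++ j1 ++ j2) hgood2 hns2
  rw [he3]
  have hchase1 : ∀ c ∈ S0, c ∈ S3 := fun c hc => hsub3 _ (hsub2 _ (hsub1 _ hc))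
  have hchase2 : ∀ c ∈ S1, c ∈ S3 := fun c hc => hsub3 _ (hsub2 _ hc)
  refine ⟨S3, j0 ++ j1 ++ j2 ++ j3, by simp, ?_, ?_, ?_, ?_, ?_, hgood3, hns3, ?_⟩
  · exact fun c hc => hchase1 _ (hsub0 _ hc)
  · intro c hc
    rcases hsnd3 c hc with h3 | h3
    · rcases hsnd2 c h3 with h2 | h2
      · rcases hsnd1 c h2 with h1 | h1
        · exact hsnd0 c h1
        · exact Or.inr h1
      · exact Or.inr h2
    · exact Or.inr h3
  · intro j hj
    simp only [List.append_assoc, List.mem_append] at hj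
    rcases hj with hj | hj | hj | hj
    · obtain ⟨hm, hv, hE⟩ := hjob0 j hj
      exact ⟨hchase1 _ hm, hv, hE⟩
    · obtain ⟨hm, hv, hE⟩ := hjob1 j hj
      exact ⟨hchase2 _ hm, hv, hE⟩
    · obtain ⟨hm, hv, hE⟩ := hjob2 j hj
      exact ⟨hsub3 _ hm, hv, hE⟩
    · obtain ⟨hm, hv, hE⟩ := hjob3 j hj
      exact ⟨hm, hv, hE⟩
  · intro d hE
    obtain ⟨i, p, hi, hp, hd1, hd2, hphys, hpos, hne⟩ := hE
    have hppw : p < pw := by rw [hpw]; exact hp.2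
    have : i = 0 ∨ i = 1 ∨ i = 2 ∨ i = 3 := by omega
    rcases this with hieq | hieq | hieq | hieq <;> subst hieq
    · exact hchase1 _ (hcmp0 p hp.1 hppw d hd1 hd2 hphys hpos hne)
    · exact hchase2 _ (hcmp1 p hp.1 hppw d hd1 hd2 hphys hpos hne)
    · exact hsub3 _ (hcmp2 p hp.1 hppw d hd1 hd2 hphys hpos hne)
    · exact hcmp3 p hp.1 hppw d hd1 hd2 hphys hpos hne
  · intro c hc hnc
    have hjlift : ∀ jl : List (Int × Int × Int), (∃ j ∈ jl, (j.1, j.2.1) = c) →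
        (jl = j0 ∨ jl = j1 ∨ jl = j2 ∨ jl = j3) →
        ∃ j ∈ j0 ++ j1 ++ j2 ++ j3, (j.1, j.2.1) = c := by
      intro jl hex hcase
      obtain ⟨j, hj, hjc⟩ := hex
      refine ⟨j, ?_, hjc⟩
      simp only [List.append_assoc, List.mem_append]
      rcases hcase with rfl | rfl | rfl | rfl
      · exact Or.inl hj
      · exact Or.inr (Or.inl hj)
      · exact Or.inr (Or.inr (Or.inl hj))
      · exact Or.inr (Or.inr (Or.inr hj))
    by_cases h2 : c ∈ S2
    · by_cases h1 : c ∈ S1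
      · by_cases h0 : c ∈ S0
        · exact hjlift j0 (hnew0 c h0 hnc) (Or.inl rfl)
        · exact hjlift j1 (hnew1 c h1 h0) (Or.inr (Or.inl rfl))
      · exact hjlift j2 (hnew2 c h2 h1) (Or.inr (Or.inr (Or.inl rfl)))
    · exact hjlift j3 (hnew3 c hc h2) (Or.inr (Or.inr (Or.inr rfl)))
  · simp only [List.append_assoc, List.length_append]
    omega

theorem pvBfs_spec (g0 : List (List Int)) (wn : Nat) (hrect : ∀ r ∈ g0, r.length = wn)
    (h w : Int) (hh : h = (g0.length : Int)) (hw : w = (wn : Nat)) (ns sL : Int × Int) :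
    ∀ (f : Nat) (S : List (Int × Int)) (q : List (Int × Int × Int)),
    2 * pvPos (pvZero S g0) + q.length ≤ f →
    pvGoodS g0 wn S → ns ∈ S →
    (∀ j ∈ q, pvReach g0 wn ns sL (j.1, j.2.1) ∧ j.2.2 = pvCell g0 j.1 j.2.1) →
    ((∃ j ∈ q, (j.1, j.2.1) = sL) ∨ (∀ d, pvE g0 wn ns sL d → d ∈ S)) →
    (∀ c ∈ S, c ≠ ns → ((∃ j ∈ q, (j.1, j.2.1) = c) ∨ (∀ d, pvE g0 wn ns c d → d ∈ S))) →
    ∃ S', pvBfs h w f (pvZero S g0) q = pvZero S' g0 ∧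
      (∀ c ∈ S, c ∈ S') ∧
      (∀ c ∈ S', c ∈ S ∨ (pvReach g0 wn ns sL c ∧ pvPhys g0 wn c ∧ c ≠ ns)) ∧
      (∀ d, pvE g0 wn ns sL d → d ∈ S') ∧
      (∀ c ∈ S', c ≠ ns → ∀ d, pvE g0 wn ns c d → d ∈ S') ∧
      pvGoodS g0 wn S' ∧ ns ∈ S' := by
  intro f
  induction f with
  | zero =>
    intro S q hfuel hS hns hq hcl1 hcl2
    have hq0 : q = [] := by
      cases q with
      | nil => rfl
      | cons a t => simp at hfuel
    subst hq0
    refine ⟨S, rfl, fun c hc => hc, fun c hc => Or.inl hc, ?_, ?_, hS, hns⟩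
    · rcases hcl1 with ⟨j, hj, _⟩ | hcl
      · exact absurd hj (by simp)
      · exact hcl
    · intro c hc hcne
      rcases hcl2 c hc hcne with ⟨j, hj, _⟩ | hcl
      · exact absurd hj (by simp)
      · exact hcl
  | succ f ih =>
    intro S q hfuel hS hns hq hcl1 hcl2
    cases q with
    | nil =>
      refine ⟨S, rfl, fun c hc => hc, fun c hc => Or.inl hc, ?_, ?_, hS, hns⟩
      · rcases hcl1 with ⟨j, hj, _⟩ | hcl
        · exact absurd hj (by simp)
        · exact hcl
      · intro c hc hcne
        rcases hcl2 c hc hcne with ⟨j, hj, _⟩ | hcl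
        · exact absurd hj (by simp)
        · exact hcl
    | cons j rest =>
      obtain ⟨y, x, pw⟩ := j
      have hjhd := hq (y, x, pw) List.mem_cons_self
      obtain ⟨S1, jnew, hescan, hsub1, hsnd1, hjob1, hcmp1, hnew1, hgood1, hns1, hfl1⟩ :=
        pvScanA_spec g0 wn hrect h w hh hw ns y x pw (by simpa using hjhd.2) S rest hS hns
      show ∃ S', pvBfs h w f (pvScanA h w (pvZero S g0, rest) y x pw).1
          (pvScanA h w (pvZero S g0, rest) y x pw).2 = pvZero S' g0 ∧ _
      rw [hescan]
      have hfuel1 : 2 * pvPos (pvZero S1 g0) + (rest ++ jnew).length ≤ f := by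
        simp only [List.length_append]
        simp only [List.length_cons] at hfuel
        omega
      have hq1 : ∀ j ∈ rest ++ jnew,
          pvReach g0 wn ns sL (j.1, j.2.1) ∧ j.2.2 = pvCell g0 j.1 j.2.1 := by
        intro j hj
        rcases List.mem_append.1 hj with hj | hj
        · exact hq j (List.mem_cons_of_mem _ hj)
        · obtain ⟨_, hv, hE⟩ := hjob1 j hj
          exact ⟨pvReach.step hjhd.1 hE, hv⟩
      have hcl1' : (∃ j ∈ rest ++ jnew, (j.1, j.2.1) = sL) ∨
          (∀ d, pvE g0 wn ns sL d → d ∈ S1) := by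
        by_cases hys : (y, x) = sL
        · exact Or.inr (fun d hd => hcmp1 d (by rw [hys]; exact hd))
        · rcases hcl1 with ⟨j', hj', hjsl⟩ | hcl
          · rcases List.mem_cons.1 hj' with hh' | hh'
            · exfalso; apply hys; rw [← hjsl, hh']
            · exact Or.inl ⟨j', List.mem_append.2 (Or.inl hh'), hjsl⟩
          · exact Or.inr (fun d hd => hsub1 _ (hcl d hd))
      have hcl2' : ∀ c ∈ S1, c ≠ ns →
          ((∃ j ∈ rest ++ jnew, (j.1, j.2.1) = c) ∨ (∀ d, pvE g0 wn ns c d → d ∈ S1)) := by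
        intro c hc hcne
        by_cases hcS : c ∈ S
        · rcases hcl2 c hcS hcne with ⟨j', hj', hjc⟩ | hcl
          · rcases List.mem_cons.1 hj' with hh' | hh'
            · subst hh'
              exact Or.inr (fun d hd => hcmp1 d (by rw [← hjc] at hd; exact hd))
            · exact Or.inl ⟨j', List.mem_append.2 (Or.inl hh'), hjc⟩
          · exact Or.inr (fun d hd => hsub1 _ (hcl d hd))
        · obtain ⟨j', hj', hjc⟩ := hnew1 c hc hcS
          exact Or.inl ⟨j', List.mem_append.2 (Or.inr hj'), hjc⟩
      obtain ⟨S', heq, hsub', hsnd', hclA, hclB, hgood', hns'⟩ :=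
        ih S1 (rest ++ jnew) hfuel1 hgood1 hns1 hq1 hcl1' hcl2'
      refine ⟨S', heq, fun c hc => hsub' _ (hsub1 _ hc), ?_, hclA, hclB, hgood', hns'⟩
      intro c hc
      rcases hsnd' c hc with hc1 | hstuff
      · rcases hsnd1 c hc1 with hcS | hcE
        · exact Or.inl hcS
        · obtain ⟨i, p, hi, hp, hd1, hd2, hphys, hpos, hne⟩ := hcE
          exact Or.inr ⟨pvReach.step hjhd.1 ⟨i, p, hi, hp, hd1, hd2, hphys, hpos, hne⟩, hphys, hne⟩
      · exact Or.inr hstuff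

def pvRecSpec (g0 : List (List Int)) (wn : Nat) (ns sL : Int × Int) (h w : Int) (f : Nat) : Prop :=
  ∀ (S : List (Int × Int)) (y x pw : Int),
    pvPos (pvZero S g0) < f → pvGoodS g0 wn S → ns ∈ S →
    pw = pvCell g0 y x → pvReach g0 wn ns sL (y, x) →
    ∃ S', pvExplode h w f (pvZero S g0) y x pw = pvZero S' g0 ∧
      (∀ c ∈ S, c ∈ S') ∧
      (∀ c ∈ S', c ∈ S ∨ (pvReach g0 wn ns sL c ∧ pvPhys g0 wn c ∧ c ≠ ns)) ∧
      (∀ d, pvE g0 wn ns (y, x) d → d ∈ S') ∧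
      (∀ c ∈ S', c ∉ S → ∀ d, pvE g0 wn ns c d → d ∈ S') ∧
      pvGoodS g0 wn S' ∧ ns ∈ S' ∧ pvPos (pvZero S' g0) ≤ pvPos (pvZero S g0)

theorem pvExplode_spec (g0 : List (List Int)) (wn : Nat) (hrect : ∀ r ∈ g0, r.length = wn)
    (h w : Int) (hh : h = (g0.length : Int)) (hw : w = (wn : Nat)) (ns sL : Int × Int) :
    ∀ f : Nat, pvRecSpec g0 wn ns sL h w f := by
  intro f
  induction f with
  | zero =>
    intro S y x pw hf hS hns hpw hreach
    omega
  | succ f IH =>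
    intro S y x pw hf hS hns hpw hreach
    -- inner loop over one direction (dy, dx), starting at distance a
    have hInner : ∀ (dy dx i : Int), (0 ≤ i ∧ i < 4) → pvDy i = dy → pvDx i = dx →
        ∀ (n : Nat) (a : Int), 1 ≤ a → (pw - a).toNat = n →
        ∀ (Scur : List (Int × Int)), pvGoodS g0 wn Scur → ns ∈ Scur →
          pvPos (pvZero Scur g0) ≤ f →
          (∀ c ∈ S, c ∈ Scur) →
          (∀ c ∈ Scur, c ∉ S → (pvReach g0 wn ns sL c ∧ pvPhys g0 wn c ∧ c ≠ ns)) →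
          (∀ c ∈ Scur, c ∉ S → ∀ d, pvE g0 wn ns c d → d ∈ Scur) →
        ∃ S', (PySem.List.pyRange a pw 1).foldl (fun g p =>
            let ny := y + dy * p
            let nx := x + dx * p
            if 0 ≤ ny ∧ ny < h ∧ 0 ≤ nx ∧ nx < w ∧ 0 < pvCell g ny nx then
              pvExplode h w f (pvSetCell g ny nx 0) ny nx (pvCell g ny nx)
            else g) (pvZero Scur g0) = pvZero S' g0 ∧
          (∀ c ∈ Scur, c ∈ S') ∧
          (∀ c ∈ S', c ∉ S → (pvReach g0 wn ns sL c ∧ pvPhys g0 wn c ∧ c ≠ ns)) ∧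
          (∀ c ∈ S', c ∉ S → ∀ d, pvE g0 wn ns c d → d ∈ S') ∧
          (∀ p : Int, a ≤ p → p < pw → ∀ d : Int × Int, d.1 = pvDy i * p + y →
            d.2 = pvDx i * p + x → pvPhys g0 wn d → 0 < pvCell g0 d.1 d.2 → d ≠ ns → d ∈ S') ∧
          pvGoodS g0 wn S' ∧ ns ∈ S' ∧ pvPos (pvZero S' g0) ≤ pvPos (pvZero Scur g0) := by
      intro dy dx i hi hdy hdx n
      induction n with
      | zero =>
        intro a ha h0 Scur hSc hnsc hfc hsubc hsndc hclc
        have hle : pw ≤ a := by omega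
        rw [PySem.List.pyRange_one_eq_nil hle]
        exact ⟨Scur, rfl, fun c hc => hc, hsndc, hclc, fun p hp1 hp2 => by omega,
          hSc, hnsc, le_refl _⟩
      | succ m ihn =>
        intro a ha h0 Scur hSc hnsc hfc hsubc hsndc hclc
        have hlt : a < pw := by omega
        rw [PySem.List.pyRange_one_cons hlt, List.foldl_cons]
        set ny := y + dy * a with hny
        set nx := x + dx * a with hnx
        by_cases hcond : 0 ≤ ny ∧ ny < h ∧ 0 ≤ nx ∧ nx < w ∧ 0 < pvCell (pvZero Scur g0) ny nx
        · have hphys : pvPhys g0 wn (ny, nx) := by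
            refine ⟨hcond.1, ?_, hcond.2.2.1, ?_⟩
            · have := hcond.2.1; rw [hh] at this; exact this
            · have := hcond.2.2.2.1; rw [hw] at this; exact this
          have hcur : pvCell (pvZero Scur g0) ny nx =
              if (ny, nx) ∈ Scur then 0 else pvCell g0 ny nx :=
            pvCell_pvZero Scur g0 wn hrect hSc ny nx hphys
          have hnotmem : (ny, nx) ∉ Scur := by
            intro hmem
            have := hcond.2.2.2.2
            rw [hcur, if_pos hmem] at this
            omega
          have hval : pvCell (pvZero Scur g0) ny nx = pvCell g0 ny nx := by
            rw [hcur, if_neg hnotmem]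
          have hpos : 0 < pvCell g0 ny nx := by rw [← hval]; exact hcond.2.2.2.2
          have hne : (ny, nx) ≠ ns := fun hcon => hnotmem (hcon ▸ hnsc)
          have hE : pvE g0 wn ns (y, x) (ny, nx) := by
            refine ⟨i, a, hi, ⟨ha, by rw [← hpw]; exact hlt⟩, ?_, ?_, hphys, hpos, hne⟩
            · show ny = pvDy i * a + y
              rw [hdy, hny]; ring
            · show nx = pvDx i * a + x
              rw [hdx, hnx]; ring
          have hreacht : pvReach g0 wn ns sL (ny, nx) := pvReach.step hreach hE
          simp only [if_pos hcond]
          have hset : pvSetCell (pvZero Scur g0) ny nx 0 = pvZero ((ny, nx) :: Scur) g0 := by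
            rw [pvZero_cons]
          have hdec : pvPos (pvZero ((ny, nx) :: Scur) g0) + 1 = pvPos (pvZero Scur g0) := by
            rw [pvZero_cons]
            refine pvPos_setCell (pvZero Scur g0) wn (pvZero_rect Scur g0 wn hrect) ny nx
              ⟨hphys.1, by rw [pvZero_length]; exact hphys.2.1⟩ ⟨hphys.2.2.1, hphys.2.2.2⟩
              hcond.2.2.2.2
          have hS1good : pvGoodS g0 wn ((ny, nx) :: Scur) := by
            intro c hc
            rcases List.mem_cons.1 hc with hcc | hcc
            · subst hcc; exact hphys
            · exact hSc c hcc
          rw [hset, hval]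
          obtain ⟨S2, heq2, hsub2, hsnd2, hcmp2, hcl2, hgood2, hns2, hfl2⟩ :=
            IH ((ny, nx) :: Scur) ny nx (pvCell g0 ny nx) (by omega) hS1good
              (List.mem_cons_of_mem _ hnsc) rfl hreacht
          rw [heq2]
          have hsubS2 : ∀ c ∈ Scur, c ∈ S2 := fun c hc => hsub2 _ (List.mem_cons_of_mem _ hc)
          have hsndS2 : ∀ c ∈ S2, c ∉ S → (pvReach g0 wn ns sL c ∧ pvPhys g0 wn c ∧ c ≠ ns) := by
            intro c hc hcS
            rcases hsnd2 c hc with hc1 | hstuff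
            · rcases List.mem_cons.1 hc1 with hcc | hcc
              · subst hcc; exact ⟨hreacht, hphys, hne⟩
              · exact hsndc c hcc hcS
            · exact hstuff
          have hclS2 : ∀ c ∈ S2, c ∉ S → ∀ d, pvE g0 wn ns c d → d ∈ S2 := by
            intro c hc hcS d hd
            by_cases hc1 : c ∈ (ny, nx) :: Scur
            · rcases List.mem_cons.1 hc1 with hcc | hcc
              · subst hcc
                exact hcmp2 d hd
              · exact hsubS2 _ (hclc c hcc hcS d hd)
            · exact hcl2 c hc hc1 d hd
          obtain ⟨S', heq', hsub', hsnd', hcl', hcmp', hgood', hns', hfl'⟩ :=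
            ihn (a + 1) (by omega) (by omega) S2 hgood2 hns2 (by omega)
              (fun c hc => hsubS2 _ (hsubc c hc)) hsndS2 hclS2
          refine ⟨S', heq', ?_, hsnd', hcl', ?_, hgood', hns', by omega⟩
          · exact fun c hc => hsub' _ (hsubS2 _ hc)
          · intro p hp1 hp2 d hd1 hd2 hdphys hdpos hdne
            by_cases hpa : p = a
            · have hdeq : d = (ny, nx) := by
                rcases d with ⟨d1, d2⟩
                have h1 : d1 = pvDy i * p + y := hd1
                have h2 : d2 = pvDx i * p + x := hd2
                refine Prod.ext ?_ ?_
                · show d1 = ny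
                  rw [hny, h1, ← hdy, hpa]; ring
                · show d2 = nx
                  rw [hnx, h2, ← hdx, hpa]; ring
              rw [hdeq]
              exact hsub' _ (hsub2 _ List.mem_cons_self)
            · exact hcmp' p (by omega) hp2 d hd1 hd2 hdphys hdpos hdne
        · simp only [if_neg hcond]
          obtain ⟨S', heq', hsub', hsnd', hcl', hcmp', hgood', hns', hfl'⟩ :=
            ihn (a + 1) (by omega) (by omega) Scur hSc hnsc hfc hsubc hsndc hclc
          refine ⟨S', heq', hsub', hsnd', hcl', ?_, hgood', hns', hfl'⟩
          intro p hp1 hp2 d hd1 hd2 hdphys hdpos hdne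
          by_cases hpa : p = a
          · have hdeq : d = (ny, nx) := by
              rcases d with ⟨d1, d2⟩
              have h1 : d1 = pvDy i * p + y := hd1
              have h2 : d2 = pvDx i * p + x := hd2
              refine Prod.ext ?_ ?_
              · show d1 = ny
                rw [hny, h1, ← hdy, hpa]; ring
              · show d2 = nx
                rw [hnx, h2, ← hdx, hpa]; ring
            subst hdeq
            by_cases hmem : (ny, nx) ∈ Scur
            · exact hsub' _ hmem
            · exfalso
              apply hcond
              refine ⟨hdphys.1, by rw [hh]; exact hdphys.2.1, hdphys.2.2.1,
                by rw [hw]; exact hdphys.2.2.2, ?_⟩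
              rw [pvCell_pvZero Scur g0 wn hrect hSc ny nx hdphys, if_neg hmem]
              exact hdpos
          · exact hcmp' p (by omega) hp2 d hd1 hd2 hdphys hdpos hdne
    -- now unfold the four directions
    show ∃ S', ([((1 : Int), (0 : Int)), (0, 1), (-1, 0), (0, -1)]).foldl _ (pvZero S g0) = pvZero S' g0 ∧ _
    simp only [List.foldl_cons, List.foldl_nil]
    obtain ⟨S0, he0, hsub0, hsnd0, hcl0, hcmp0, hgood0, hns0, hfl0⟩ :=
      hInner 1 0 0 ⟨by omega, by omega⟩ (by decide) (by decide) (pw - 1).toNat 1 (by omega) rfl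
        S hS hns (by omega) (fun c hc => hc) (fun c hc hnc => absurd hc hnc)
        (fun c hc hnc => absurd hc hnc)
    rw [he0]
    obtain ⟨S1, he1, hsub1, hsnd1, hcl1, hcmp1, hgood1, hns1, hfl1⟩ :=
      hInner 0 1 1 ⟨by omega, by omega⟩ (by decide) (by decide) (pw - 1).toNat 1 (by omega) rfl
        S0 hgood0 hns0 (by omega) (fun c hc => hsub0 _ hc) hsnd0 hcl0
    rw [he1]
    obtain ⟨S2, he2, hsub2, hsnd2, hcl2, hcmp2, hgood2, hns2, hfl2⟩ :=
      hInner (-1) 0 2 ⟨by omega, by omega⟩ (by decide) (by decide) (pw - 1).toNat 1 (by omega) rfl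
        S1 hgood1 hns1 (by omega) (fun c hc => hsub1 _ (hsub0 _ hc)) hsnd1 hcl1
    rw [he2]
    obtain ⟨S3, he3, hsub3, hsnd3, hcl3, hcmp3, hgood3, hns3, hfl3⟩ :=
      hInner 0 (-1) 3 ⟨by omega, by omega⟩ (by decide) (by decide) (pw - 1).toNat 1 (by omega) rfl
        S2 hgood2 hns2 (by omega) (fun c hc => hsub2 _ (hsub1 _ (hsub0 _ hc))) hsnd2 hcl2
    rw [he3]
    have hchase0 : ∀ c ∈ S0, c ∈ S3 := fun c hc => hsub3 _ (hsub2 _ (hsub1 _ hc))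
    have hchase1 : ∀ c ∈ S1, c ∈ S3 := fun c hc => hsub3 _ (hsub2 _ hc)
    refine ⟨S3, rfl, ?_, ?_, ?_, ?_, hgood3, hns3, by omega⟩
    · exact fun c hc => hchase0 _ (hsub0 _ hc)
    · intro c hc
      by_cases hcS : c ∈ S
      · exact Or.inl hcS
      · exact Or.inr (hsnd3 c hc hcS)
    · intro d hE
      obtain ⟨i, p, hi, hp, hd1, hd2, hphys, hpos, hne⟩ := hE
      have hppw : p < pw := by rw [hpw]; exact hp.2
      have hicase : i = 0 ∨ i = 1 ∨ i = 2 ∨ i = 3 := by omega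
      rcases hicase with hieq | hieq | hieq | hieq <;> subst hieq
      · exact hchase0 _ (hcmp0 p hp.1 hppw d hd1 hd2 hphys hpos hne)
      · exact hchase1 _ (hcmp1 p hp.1 hppw d hd1 hd2 hphys hpos hne)
      · exact hsub3 _ (hcmp2 p hp.1 hppw d hd1 hd2 hphys hpos hne)
      · exact hcmp3 p hp.1 hppw d hd1 hd2 hphys hpos hne
    · exact hcl3

theorem pvReach_mem (g0 : List (List Int)) (wn : Nat) (ns sL : Int × Int)
    (T : List (Int × Int)) (_hnsT : ns ∈ T)
    (hclA : ∀ d, pvE g0 wn ns sL d → d ∈ T)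
    (hclB : ∀ c ∈ T, c ≠ ns → ∀ d, pvE g0 wn ns c d → d ∈ T) :
    ∀ z, pvReach g0 wn ns sL z → z = sL ∨ (z ∈ T ∧ z ≠ ns) := by
  intro z hz
  induction hz with
  | base => exact Or.inl rfl
  | step hc hE ih =>
    right
    obtain ⟨i, p, hi, hp, hd1, hd2, hphys, hpos, hne⟩ := hE
    refine ⟨?_, hne⟩
    rcases ih with rfl | ⟨hcT, hcne⟩
    · exact hclA _ ⟨i, p, hi, hp, hd1, hd2, hphys, hpos, hne⟩
    · exact hclB _ hcT hcne _ ⟨i, p, hi, hp, hd1, hd2, hphys, hpos, hne⟩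

theorem pvRowLen (g0 : List (List Int)) (wn : Nat) (hrect : ∀ r ∈ g0, r.length = wn)
    (y : Int) (hy : 0 ≤ y ∧ y < (g0.length : Int)) :
    ((PySem.List.pyGetD g0 y ([] : List Int)).length : Int) = (wn : Int) := by
  rw [pvRow_eq g0 y hy.1 hy.2]
  exact_mod_cast congrArg Nat.cast (hrect _ (List.getElem_mem _))

theorem pvExplosionsAgree (g0 : List (List Int)) (wn : Nat)
    (hrect : ∀ r ∈ g0, r.length = wn) (h w : Int) (hh : h = (g0.length : Int))
    (hw : w = (wn : Nat)) (fy gx : Int)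
    (hfy : 0 ≤ fy ∧ fy < (g0.length : Int)) (hgx : -(wn : Int) ≤ gx ∧ gx < (wn : Int))
    (_hvpos : 0 < pvCell g0 fy gx) :
    pvBfs h w (2 * pvPos (pvSetCell g0 fy gx 0) + 2) (pvSetCell g0 fy gx 0)
        [(fy, gx, pvCell g0 fy gx)]
      = pvExplode h w (pvPos (pvSetCell g0 fy gx 0) + 1) (pvSetCell g0 fy gx 0) fy gx
        (pvCell g0 fy gx) := by
  set sL : Int × Int := (fy, gx) with hsL
  set ns : Int × Int := (fy, if gx < 0 then gx + wn else gx) with hns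
  have hnsphys : pvPhys g0 wn ns := by
    refine ⟨hfy.1, hfy.2, ?_, ?_⟩
    · show (0 : Int) ≤ (if gx < 0 then gx + (wn : Int) else gx)
      split <;> omega
    · show (if gx < 0 then gx + (wn : Int) else gx) < (wn : Int)
      split <;> omega
  have hseed : pvSetCell g0 fy gx 0 = pvZero [ns] g0 := by
    by_cases hneg : gx < 0
    · have hrow := pvRowLen g0 wn hrect fy hfy
      have := pvSetCell_wrap g0 fy gx 0 (by omega) hneg
      rw [this]
      have hcast : gx + ((PySem.List.pyGetD g0 fy ([] : List Int)).length : Int) = gx + (wn : Int) := by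
        omega
      rw [hcast, pvZero_cons, hns]
      simp [pvZero, hneg]
    · rw [pvZero_cons, hns]
      simp [pvZero, hneg]
  have hGood : pvGoodS g0 wn [ns] := by
    intro c hc
    rcases List.mem_cons.1 hc with hcc | hcc
    · subst hcc; exact hnsphys
    · simp at hcc
  have hnsmem : ns ∈ [ns] := List.mem_cons_self
  -- BFS run
  obtain ⟨SA, heqA, hsubA, hsndA, hclA1, hclA2, hgoodA, hnsA⟩ :=
    pvBfs_spec g0 wn hrect h w hh hw ns sL (2 * pvPos (pvSetCell g0 fy gx 0) + 2)
      [ns] [(fy, gx, pvCell g0 fy gx)]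
      (by rw [← hseed]; simp) hGood hnsmem
      (by
        intro j hj
        rcases List.mem_cons.1 hj with hjj | hjj
        · subst hjj; exact ⟨pvReach.base, rfl⟩
        · simp at hjj)
      (Or.inl ⟨(fy, gx, pvCell g0 fy gx), List.mem_cons_self, rfl⟩)
      (by
        intro c hc hcne
        rcases List.mem_cons.1 hc with hcc | hcc
        · exact absurd hcc hcne
        · simp at hcc)
  -- DFS run
  obtain ⟨SB, heqB, hsubB, hsndB, hcmpB, hclB, hgoodB, hnsB, _⟩ :=
    pvExplode_spec g0 wn hrect h w hh hw ns sL (pvPos (pvSetCell g0 fy gx 0) + 1)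
      [ns] fy gx (pvCell g0 fy gx)
      (by rw [← hseed]; omega) hGood hnsmem rfl pvReach.base
  rw [hseed] at heqA heqB ⊢
  rw [heqA, heqB]
  -- both cleared sets have the same members
  have hclB2 : ∀ c ∈ SB, c ≠ ns → ∀ d, pvE g0 wn ns c d → d ∈ SB := by
    intro c hc hcne d hd
    apply hclB c hc _ d hd
    intro hmem
    rcases List.mem_cons.1 hmem with hcc | hcc
    · exact hcne hcc
    · simp at hcc
  have hmem : ∀ c, c ∈ SA ↔ c ∈ SB := by
    intro c
    constructor
    · intro hc
      rcases hsndA c hc with hcS | ⟨hreach, hphys, hcne⟩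
      · rcases List.mem_cons.1 hcS with hcc | hcc
        · subst hcc; exact hsubB _ hnsmem
        · simp at hcc
      · rcases pvReach_mem g0 wn ns sL SB hnsB hcmpB hclB2 c hreach with rfl | ⟨hcT, _⟩
        · exfalso
          by_cases hneg : gx < 0
          · have h2 : (0 : Int) ≤ gx := by simpa [hsL] using hphys.2.2.1
            omega
          · exact hcne (by rw [hsL, hns, if_neg hneg])
        · exact hcT
    · intro hc
      rcases hsndB c hc with hcS | ⟨hreach, hphys, hcne⟩
      · rcases List.mem_cons.1 hcS with hcc | hcc
        · subst hcc; exact hsubA _ hnsmem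
        · simp at hcc
      · rcases pvReach_mem g0 wn ns sL SA hnsA hclA1 hclA2 c hreach with rfl | ⟨hcT, _⟩
        · exfalso
          by_cases hneg : gx < 0
          · have h2 : (0 : Int) ≤ gx := by simpa [hsL] using hphys.2.2.1
            omega
          · exact hcne (by rw [hsL, hns, if_neg hneg])
        · exact hcT
  exact pvZero_congr SA SB g0 wn hrect hgoodA hgoodB hmem

theorem pvGetD_zero_head (g : List (List Int)) (hg : g ≠ []) :
    PySem.List.pyGetD g 0 ([] : List Int) = g.headD [] := by
  cases g with
  | nil => exact absurd rfl hg
  | cons r t => rw [PySem.List.pyGetD_zero_cons]; rfl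

theorem pvFind_some (g : List (List Int)) (gx fy : Int)
    (hfind : findFirstBrick g gx = some fy) :
    (0 ≤ fy ∧ fy < (g.length : Int)) ∧ 0 < pvCell g fy gx := by
  unfold findFirstBrick at hfind
  have hmem := List.mem_of_find?_eq_some hfind
  have hpred := List.find?_some hfind
  rw [PySem.List.mem_pyRange_one] at hmem
  exact ⟨hmem, by simpa using hpred⟩

theorem drop_ball_eq_alt (grid : List (List Int)) (grid_x : Int)
    (h1 : grid ≠ []) (h2 : ∀ row ∈ grid, row.length = (grid.headD []).length)
    (h3 : -((grid.headD []).length : Int) ≤ grid_x ∧ grid_x < ((grid.headD []).length : Int)) :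
    drop_ball grid grid_x = drop_ball_alt grid grid_x := by
  unfold drop_ball drop_ball_alt
  cases hfind : findFirstBrick grid grid_x with
  | none => rfl
  | some fy =>
    dsimp only
    obtain ⟨hfy, hvpos⟩ := pvFind_some grid grid_x fy hfind
    have hww : ((PySem.List.pyGetD grid 0 ([] : List Int)).length : Int)
        = ((grid.headD []).length : Int) := by
      rw [pvGetD_zero_head grid h1]
    rw [hww]
    exact congrArg (pvGravity (grid.length : Int) ((grid.headD []).length : Int))
      (pvExplosionsAgree grid (grid.headD []).length h2
        (grid.length : Int) ((grid.headD []).length : Int) rfl rfl fy grid_x hfy h3 hvpos)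

-- ===== VERDICT (by name: the statement is the Claim_ definition above) =====
theorem drop_ball_spec : Claim_equal_drop_ball := by
  intro grid grid_x _ hpre
  unfold Spec_drop_ball
  exact drop_ball_eq_alt grid grid_x hpre.1 hpre.2.1 hpre.2.2
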